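-- pv_equiv track=rewrite | github.com/Z-Sofiene/cryptography | py_codes/Classic_crypt_decrypt.py | chiCesar
-- ===== SOURCE A (Python) =====
-- def chiCesar(pas, text):
--     alphabet = "abcdefghijklmnopqrstuvwxyz"
--     text = text.replace(" ", "")
--     message = ""
--     compteur = 0
--     text = text.lower()
--     for i in text:  # // salut mes amis // X
--         message += alphabet[(alphabet.index(i) + pas) % 26].upper()
--         compteur += 1
--         if compteur == 5:
--             message += " "
--             compteur = 0
--     return message
-- ===== SOURCE B (Python) =====
-- def chiCesar(pas, text):
--     alphabet = "abcdefghijklmnopqrstuvwxyz"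
--     # pass 1: shift every character (spaces removed, lowercased)
--     shifted = []
--     for c in text.replace(" ", "").lower():
--         shifted.append(alphabet[(alphabet.index(c) + pas) % 26].upper())
--     shifted = "".join(shifted)
--     # pass 2: regroup into 5-character chunks, a space after every full chunk
--     out = []
--     for i in range(0, len(shifted), 5):
--         chunk = shifted[i:i + 5]
--         out.append(chunk)
--         if len(chunk) == 5:
--             out.append(" ")
--     return "".join(out)
-- ===== Notes on version B (the rewrite author's own statement) =====
-- stated objective: alternative
-- what changed: Replaces A's single counter-driven loop (append a space when a modular counter hits 5) by two independent passes: a map pass that shifts every character, then a chunking pass over 5-character slices that inserts the spaces.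
import Mathlib
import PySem

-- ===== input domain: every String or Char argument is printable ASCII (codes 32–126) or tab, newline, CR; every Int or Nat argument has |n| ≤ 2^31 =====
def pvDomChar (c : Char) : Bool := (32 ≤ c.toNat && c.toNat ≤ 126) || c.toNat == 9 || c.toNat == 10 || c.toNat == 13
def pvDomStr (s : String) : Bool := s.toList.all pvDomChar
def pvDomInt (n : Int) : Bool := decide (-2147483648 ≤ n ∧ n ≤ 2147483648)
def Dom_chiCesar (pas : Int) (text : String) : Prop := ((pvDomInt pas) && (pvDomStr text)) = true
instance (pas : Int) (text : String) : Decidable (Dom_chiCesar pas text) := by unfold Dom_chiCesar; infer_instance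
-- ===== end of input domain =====

-- B splits A's single counter-driven loop into a map pass (shift every char) plus a chunking
-- pass (5-char slices, a space after every full slice); objective: alternative decomposition.


-- ===== PORT A =====
-- alphabet = "abcdefghijklmnopqrstuvwxyz"
def pvAlpha : List Char := "abcdefghijklmnopqrstuvwxyz".toList

-- alphabet[(alphabet.index(i) + pas) % 26].upper(); none = the ValueError of alphabet.index
def pvShift? (pas : Int) (c : Char) : Option Char :=
  match PySem.List.index? pvAlpha c with
  | none => none
  | some k =>
      (PySem.List.pyGet? pvAlpha (PySem.Int.mod ((k : Int) + pas) 26)).map PySem.Chars.upperChar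

-- text.replace(" ", "") then text.lower(), as character lists
def pvCleanA (text : String) : List Char :=
  PySem.Chars.lower (PySem.Chars.replace text.toList [' '] [])

-- A's for-loop: state = (message, compteur); none where Python raises ValueError
def chiCesarLoop (pas : Int) (t : List Char) (message : List Char) (compteur : Int) :
    Option (List Char) :=
  match t with
  | [] => some message
  | i :: rest =>
      match pvShift? pas i with
      | none => none
      | some u =>
          let message := message ++ [u]
          let compteur := compteur + 1
          if compteur == 5 then chiCesarLoop pas rest (message ++ [' ']) 0
          else chiCesarLoop pas rest message compteur

def chiCesar (pas : Int) (text : String) : String :=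
  match chiCesarLoop pas (pvCleanA text) [] 0 with
  | some message => String.ofList message
  | none => ""   -- Python raises ValueError here; excluded by Pre_chiCesar

-- ===== PORT B =====
-- pass 1: shifted = [alphabet[(alphabet.index(c)+pas)%26].upper() for c in clean]
def pvShiftAll? (pas : Int) (t : List Char) : Option (List Char) :=
  match t with
  | [] => some []
  | c :: rest =>
      match pvShift? pas c, pvShiftAll? pas rest with
      | some u, some us => some (u :: us)
      | _, _ => none

-- pass 2: for i in range(0, len, 5): chunk = shifted[i:i+5]; out += chunk (+ " " if len(chunk)==5)
def pvChunks (l : List Char) : List Char :=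
  if _h : l = [] then []
  else l.take 5 ++ (if (l.take 5).length = 5 then [' '] else []) ++ pvChunks (l.drop 5)
termination_by l.length
decreasing_by
  cases l with
  | nil => exact absurd rfl _h
  | cons a t => simp

def chiCesar_alt (pas : Int) (text : String) : String :=
  match pvShiftAll? pas (pvCleanA text) with
  | some shifted => String.ofList (pvChunks shifted)
  | none => ""   -- Python raises ValueError here; excluded by Pre_chiCesar

-- ===== PRECONDITION & SPEC =====
-- Exactly the inputs where Python A returns: every character of text is a space or an
-- ASCII letter (anything else makes alphabet.index raise ValueError).
def Pre_chiCesar (pas : Int) (text : String) : Prop :=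
  (text.toList.all (fun c => c == ' ' || ('a' ≤ c && c ≤ 'z') || ('A' ≤ c && c ≤ 'Z'))) = true
instance (pas : Int) (text : String) : Decidable (Pre_chiCesar pas text) := by
  unfold Pre_chiCesar; infer_instance

def pvWitness_chiCesar : Int × String := (3, "salut mes amis")

def Spec_chiCesar (pas : Int) (text : String) (out : String) : Prop := out = chiCesar_alt pas text
instance (pas : Int) (text : String) (out : String) : Decidable (Spec_chiCesar pas text out) := by
  unfold Spec_chiCesar; infer_instance

-- ===== CLAIM (what is proved, stated in full; the proofs are below) =====
def Claim_equal_chiCesar : Prop := ∀ (pas : Int) (text : String), Dom_chiCesar pas text → Pre_chiCesar pas text → Spec_chiCesar pas text (chiCesar pas text)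

-- ===== LEMMAS AND PROOFS =====

-- A's counter interleaving, isolated: emit each char, a space after every 5th
def pvInter (compteur : Int) (l : List Char) : List Char :=
  match l with
  | [] => []
  | x :: xs => x :: (if compteur + 1 == 5 then ' ' :: pvInter 0 xs else pvInter (compteur + 1) xs)

theorem chiCesarLoop_eq (pas : Int) (t : List Char) :
    ∀ (msg : List Char) (cnt : Int),
      chiCesarLoop pas t msg cnt = (pvShiftAll? pas t).map (fun sh => msg ++ pvInter cnt sh) := by
  induction t with
  | nil => intro msg cnt; simp [chiCesarLoop, pvShiftAll?, pvInter]
  | cons c rest ih =>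
      intro msg cnt
      simp only [chiCesarLoop, pvShiftAll?]
      cases hs : pvShift? pas c with
      | none => simp
      | some u =>
          by_cases h5 : cnt + 1 = 5
          · simp only [h5, beq_self_eq_true, if_true, ih]
            cases pvShiftAll? pas rest <;> simp [pvInter, h5]
          · have : (cnt + 1 == 5) = false := by simpa using h5
            simp only [this, if_false, Bool.false_eq_true, ih]
            cases pvShiftAll? pas rest <;> simp [pvInter, this]

theorem pvInter_eq_pvChunks_fuel (n : Nat) :
    ∀ (l : List Char), l.length ≤ n → pvInter 0 l = pvChunks l := by
  induction n with
  | zero =>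
      intro l hl
      have : l = [] := List.length_eq_zero_iff.mp (Nat.le_zero.mp hl)
      subst this; simp [pvInter, pvChunks]
  | succ n ih =>
      intro l hl
      match l with
      | [] => simp [pvInter, pvChunks]
      | [a] => simp [pvInter, pvChunks]
      | [a, b] => simp [pvInter, pvChunks]
      | [a, b, c] => simp [pvInter, pvChunks]
      | [a, b, c, d] => simp [pvInter, pvChunks]
      | a :: b :: c :: d :: e :: rest =>
          have hr : rest.length ≤ n := by
            simp only [List.length_cons] at hl; omega
          rw [pvChunks, dif_neg (List.cons_ne_nil a _)]
          simp [pvInter, ih rest hr]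

theorem pvInter_eq_pvChunks (l : List Char) : pvInter 0 l = pvChunks l :=
  pvInter_eq_pvChunks_fuel l.length l le_rfl

-- ===== VERDICT (by name: the statement is the Claim_ definition above) =====
theorem chiCesar_spec : Claim_equal_chiCesar := by
  intro pas text _ _
  unfold Spec_chiCesar chiCesar chiCesar_alt
  rw [chiCesarLoop_eq]
  cases pvShiftAll? pas (pvCleanA text) with
  | none => rfl
  | some sh => simp [pvInter_eq_pvChunks]
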